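-- pv_equiv track=rewrite | github.com/chrisbruh26/RootAccess | scalable_overhaul/game_with_json/npc_message_groups/msg_coordinator-v3.py | _determine_message_type
-- ===== SOURCE A (Python) =====
-- def _determine_message_type(message):
--     """Determine the type of NPC message for throttling purposes."""
--     message_lower = message.lower()
--
--     # Check for hazard trigger messages first
--     if any(trigger in message_lower for trigger in ["triggers the", "sets off the", "activates the", "fumbles with", "accidentally triggers"]):
--         return "hazard_trigger"
--
--     # Check for gardening actions
--     if any(garden_action in message_lower for garden_action in ["waters the", "plants the", "harvests the", "applies fertilizer", "garden", "planting", "watering"]):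
--         return "npc_gardening"
--
--     # Check for teleport messages
--     if "teleport" in message_lower:
--         return "player_teleport"
--
--     # Check for resist hazard messages
--     if "resists the" in message_lower and "effect" in message_lower:
--         return "npc_resist_hazard"
--
--     # Check for specific hallucination descriptions (not just "is hallucinating")
--     hallucination_indicators = [
--         "sees ", "imagines ", "thinks ", "believes ",
--         "hallucinates ", "visualizes ", "perceives ",
--         "screams about ", "yells about ", "mutters about ",
--         "swats at ", "runs from ", "hides from ",
--         "stares at ", "points at ", "laughs at ",
--         "confused by ", "startled by ", "terrified of ",
--         "dancing with ", "talking to ", "arguing with ",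
--         "fighting with ", "fleeing from ", "cowering from "
--     ]
--     if any(indicator in message_lower for indicator in hallucination_indicators):
--         return "npc_hallucination_detail"
--
--     # Standard message types
--     if "attack" in message_lower or "damage" in message_lower or "health" in message_lower:
--         return "npc_attack"
--     elif "hallucinating" in message_lower or "hallucination" in message_lower or "seeing things" in message_lower:
--         return "npc_hallucination_detail"  # Upgraded from npc_hallucination to ensure it's shown
--     elif "affected by hallucinations" in message_lower:
--         return "npc_hallucination"
--     elif "friendly" in message_lower or "friendliness" in message_lower or "smiles at you" in message_lower:
--         return "npc_friendly"
--     elif "gives you" in message_lower or "gift" in message_lower: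
--         return "npc_gift"
--     elif "falls" in message_lower or "falling" in message_lower or "struck by" in message_lower:
--         return "npc_falling_object"
--     # Treat unnoticed/distracted messages as idle behaviors
--     elif ("doesn't notice" in message_lower or "unaware" in message_lower or
--           "looking away" in message_lower or "hasn't spotted" in message_lower or
--           "looking the other way" in message_lower or "distracted" in message_lower or
--           "fails to notice" in message_lower or "oblivious" in message_lower or
--           "walks past your hiding spot" in message_lower):
--         return "npc_idle"  # Categorize as idle instead of unnoticed
--     elif "talk" in message_lower or "says" in message_lower or "speaking" in message_lower:
--         return "npc_talk"
--     elif "interact" in message_lower or "using" in message_lower or "picks up" in message_lower: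
--         return "npc_interact"
--     elif "standing" in message_lower or "idle" in message_lower or "waiting" in message_lower:
--         return "npc_idle"
--
--     return None
-- ===== SOURCE B (Python) =====
-- # Classify by a flat pattern index: find ALL matching patterns and keep the
-- # minimum priority, instead of an ordered early-exit if/elif cascade.
-- # The index is sorted alphabetically (its order is irrelevant to the result).
--
-- _CATEGORIES = ['hazard_trigger', 'npc_gardening', 'player_teleport', 'npc_resist_hazard', 'npc_hallucination_detail', 'npc_attack', 'npc_hallucination_detail', 'npc_hallucination', 'npc_friendly', 'npc_gift', 'npc_falling_object', 'npc_idle', 'npc_talk', 'npc_interact', 'npc_idle']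
--
-- # (substring, corequisite substring or None, priority); priority = original rule rank.
-- _ENTRIES = [
--     ('accidentally triggers', None, 0),
--     ('activates the', None, 0),
--     ('affected by hallucinations', None, 7),
--     ('applies fertilizer', None, 1),
--     ('arguing with ', None, 4),
--     ('attack', None, 5),
--     ('believes ', None, 4),
--     ('confused by ', None, 4),
--     ('cowering from ', None, 4),
--     ('damage', None, 5),
--     ('dancing with ', None, 4),
--     ('distracted', None, 11),
--     ("doesn't notice", None, 11),
--     ('fails to notice', None, 11),
--     ('falling', None, 10),
--     ('falls', None, 10),
--     ('fighting with ', None, 4),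
--     ('fleeing from ', None, 4),
--     ('friendliness', None, 8),
--     ('friendly', None, 8),
--     ('fumbles with', None, 0),
--     ('garden', None, 1),
--     ('gift', None, 9),
--     ('gives you', None, 9),
--     ('hallucinates ', None, 4),
--     ('hallucinating', None, 6),
--     ('hallucination', None, 6),
--     ('harvests the', None, 1),
--     ("hasn't spotted", None, 11),
--     ('health', None, 5),
--     ('hides from ', None, 4),
--     ('idle', None, 14),
--     ('imagines ', None, 4),
--     ('interact', None, 13),
--     ('laughs at ', None, 4),
--     ('looking away', None, 11),
--     ('looking the other way', None, 11),
--     ('mutters about ', None, 4),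
--     ('oblivious', None, 11),
--     ('perceives ', None, 4),
--     ('picks up', None, 13),
--     ('planting', None, 1),
--     ('plants the', None, 1),
--     ('points at ', None, 4),
--     ('resists the', 'effect', 3),
--     ('runs from ', None, 4),
--     ('says', None, 12),
--     ('screams about ', None, 4),
--     ('seeing things', None, 6),
--     ('sees ', None, 4),
--     ('sets off the', None, 0),
--     ('smiles at you', None, 8),
--     ('speaking', None, 12),
--     ('standing', None, 14),
--     ('stares at ', None, 4),
--     ('startled by ', None, 4),
--     ('struck by', None, 10),
--     ('swats at ', None, 4),
--     ('talk', None, 12),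
--     ('talking to ', None, 4),
--     ('teleport', None, 2),
--     ('terrified of ', None, 4),
--     ('thinks ', None, 4),
--     ('triggers the', None, 0),
--     ('unaware', None, 11),
--     ('using', None, 13),
--     ('visualizes ', None, 4),
--     ('waiting', None, 14),
--     ('walks past your hiding spot', None, 11),
--     ('watering', None, 1),
--     ('waters the', None, 1),
--     ('yells about ', None, 4),
-- ]
--
--
-- def _determine_message_type(message):
--     """Determine the type of NPC message for throttling purposes."""
--     message_lower = message.lower()
--     best = None
--     for sub, extra, prio in _ENTRIES:
--         if sub in message_lower and (extra is None or extra in message_lower):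
--             best = prio if best is None else min(best, prio)
--     return None if best is None else _CATEGORIES[best]
-- ===== Notes on version B (the rewrite author's own statement) =====
-- stated objective: alternative
-- what changed: Replaces A's ordered early-exit if/elif cascade by a flat, alphabetically sorted (substring, corequisite, priority) index scanned in full, keeping the minimum matched priority and indexing a category table; correct because the priorities are the cascade ranks, so the minimum matched priority is exactly the first rule A fires.
import Mathlib
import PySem

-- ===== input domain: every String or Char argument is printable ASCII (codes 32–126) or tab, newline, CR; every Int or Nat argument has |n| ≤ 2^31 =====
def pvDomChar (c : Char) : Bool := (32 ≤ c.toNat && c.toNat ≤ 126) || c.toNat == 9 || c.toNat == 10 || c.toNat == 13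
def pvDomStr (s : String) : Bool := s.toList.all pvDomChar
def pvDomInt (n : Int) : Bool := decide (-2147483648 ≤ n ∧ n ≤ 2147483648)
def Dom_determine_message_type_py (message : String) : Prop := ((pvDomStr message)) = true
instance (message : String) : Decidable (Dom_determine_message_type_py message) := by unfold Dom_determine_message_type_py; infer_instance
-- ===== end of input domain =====

-- B replaces A's ordered early-exit if/elif cascade by a flat, alphabetically sorted
-- pattern index scanned once, keeping the MINIMUM priority among all matches
-- (order-independent decomposition; same return value).

-- ===== PORT A =====
def determine_message_type_py (message : String) : Option String :=
  let ml := PySem.Str.lower message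
  if (["triggers the", "sets off the", "activates the", "fumbles with", "accidentally triggers"].any
      fun t => PySem.Str.isIn t ml) then some "hazard_trigger"
  else if (["waters the", "plants the", "harvests the", "applies fertilizer", "garden", "planting", "watering"].any
      fun t => PySem.Str.isIn t ml) then some "npc_gardening"
  else if PySem.Str.isIn "teleport" ml then some "player_teleport"
  else if PySem.Str.isIn "resists the" ml && PySem.Str.isIn "effect" ml then some "npc_resist_hazard"
  else if (["sees ", "imagines ", "thinks ", "believes ",
            "hallucinates ", "visualizes ", "perceives ",
            "screams about ", "yells about ", "mutters about ",
            "swats at ", "runs from ", "hides from ",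
            "stares at ", "points at ", "laughs at ",
            "confused by ", "startled by ", "terrified of ",
            "dancing with ", "talking to ", "arguing with ",
            "fighting with ", "fleeing from ", "cowering from "].any
      fun t => PySem.Str.isIn t ml) then some "npc_hallucination_detail"
  else if PySem.Str.isIn "attack" ml || PySem.Str.isIn "damage" ml || PySem.Str.isIn "health" ml then
    some "npc_attack"
  else if PySem.Str.isIn "hallucinating" ml || PySem.Str.isIn "hallucination" ml || PySem.Str.isIn "seeing things" ml then
    some "npc_hallucination_detail"
  else if PySem.Str.isIn "affected by hallucinations" ml then some "npc_hallucination"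
  else if PySem.Str.isIn "friendly" ml || PySem.Str.isIn "friendliness" ml || PySem.Str.isIn "smiles at you" ml then
    some "npc_friendly"
  else if PySem.Str.isIn "gives you" ml || PySem.Str.isIn "gift" ml then some "npc_gift"
  else if PySem.Str.isIn "falls" ml || PySem.Str.isIn "falling" ml || PySem.Str.isIn "struck by" ml then
    some "npc_falling_object"
  else if PySem.Str.isIn "doesn't notice" ml || PySem.Str.isIn "unaware" ml ||
          PySem.Str.isIn "looking away" ml || PySem.Str.isIn "hasn't spotted" ml ||
          PySem.Str.isIn "looking the other way" ml || PySem.Str.isIn "distracted" ml ||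
          PySem.Str.isIn "fails to notice" ml || PySem.Str.isIn "oblivious" ml ||
          PySem.Str.isIn "walks past your hiding spot" ml then some "npc_idle"
  else if PySem.Str.isIn "talk" ml || PySem.Str.isIn "says" ml || PySem.Str.isIn "speaking" ml then
    some "npc_talk"
  else if PySem.Str.isIn "interact" ml || PySem.Str.isIn "using" ml || PySem.Str.isIn "picks up" ml then
    some "npc_interact"
  else if PySem.Str.isIn "standing" ml || PySem.Str.isIn "idle" ml || PySem.Str.isIn "waiting" ml then
    some "npc_idle"
  else none

-- ===== PORT B =====
def pvCategories : List String :=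
  ["hazard_trigger", "npc_gardening", "player_teleport", "npc_resist_hazard",
   "npc_hallucination_detail", "npc_attack", "npc_hallucination_detail", "npc_hallucination",
   "npc_friendly", "npc_gift", "npc_falling_object", "npc_idle", "npc_talk", "npc_interact",
   "npc_idle"]

-- the flat alphabetical pattern index of Source B: (substring, corequisite substring or none, priority)
def pvEntries : List (String × Option String × Nat) :=
  [("accidentally triggers", none, 0),
   ("activates the", none, 0),
   ("affected by hallucinations", none, 7),
   ("applies fertilizer", none, 1),
   ("arguing with ", none, 4),
   ("attack", none, 5),
   ("believes ", none, 4),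
   ("confused by ", none, 4),
   ("cowering from ", none, 4),
   ("damage", none, 5),
   ("dancing with ", none, 4),
   ("distracted", none, 11),
   ("doesn't notice", none, 11),
   ("fails to notice", none, 11),
   ("falling", none, 10),
   ("falls", none, 10),
   ("fighting with ", none, 4),
   ("fleeing from ", none, 4),
   ("friendliness", none, 8),
   ("friendly", none, 8),
   ("fumbles with", none, 0),
   ("garden", none, 1),
   ("gift", none, 9),
   ("gives you", none, 9),
   ("hallucinates ", none, 4),
   ("hallucinating", none, 6),
   ("hallucination", none, 6),
   ("harvests the", none, 1),
   ("hasn't spotted", none, 11),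
   ("health", none, 5),
   ("hides from ", none, 4),
   ("idle", none, 14),
   ("imagines ", none, 4),
   ("interact", none, 13),
   ("laughs at ", none, 4),
   ("looking away", none, 11),
   ("looking the other way", none, 11),
   ("mutters about ", none, 4),
   ("oblivious", none, 11),
   ("perceives ", none, 4),
   ("picks up", none, 13),
   ("planting", none, 1),
   ("plants the", none, 1),
   ("points at ", none, 4),
   ("resists the", some "effect", 3),
   ("runs from ", none, 4),
   ("says", none, 12),
   ("screams about ", none, 4),
   ("seeing things", none, 6),
   ("sees ", none, 4),
   ("sets off the", none, 0),
   ("smiles at you", none, 8),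
   ("speaking", none, 12),
   ("standing", none, 14),
   ("stares at ", none, 4),
   ("startled by ", none, 4),
   ("struck by", none, 10),
   ("swats at ", none, 4),
   ("talk", none, 12),
   ("talking to ", none, 4),
   ("teleport", none, 2),
   ("terrified of ", none, 4),
   ("thinks ", none, 4),
   ("triggers the", none, 0),
   ("unaware", none, 11),
   ("using", none, 13),
   ("visualizes ", none, 4),
   ("waiting", none, 14),
   ("walks past your hiding spot", none, 11),
   ("watering", none, 1),
   ("waters the", none, 1),
   ("yells about ", none, 4)]

-- the loop test of Source B: sub in message_lower and (extra is None or extra in message_lower)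
def pvEntryMatch (ml : String) (e : String × Option String × Nat) : Bool :=
  PySem.Str.isIn e.1 ml && (match e.2.1 with | none => true | some x => PySem.Str.isIn x ml)

-- the loop update of Source B: best = prio if best is None else min(best, prio)
def pvOptMin (acc : Option Nat) (p : Nat) : Option Nat :=
  match acc with | none => some p | some q => some (min q p)

def determine_message_type_py_alt (message : String) : Option String :=
  let ml := PySem.Str.lower message
  let best := pvEntries.foldl (fun acc e => if pvEntryMatch ml e then pvOptMin acc e.2.2 else acc) none
  match best with
  | none => none
  | some p => PySem.List.pyGet? pvCategories (p : Int)  -- _CATEGORIES[best]; the index is always in range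

-- ===== PRECONDITION & SPEC =====
def Spec_determine_message_type_py (message : String) (out : Option String) : Prop := out = determine_message_type_py_alt message
instance (message : String) (out : Option String) : Decidable (Spec_determine_message_type_py message out) := by unfold Spec_determine_message_type_py; infer_instance

-- ===== CLAIM (what is proved, stated in full; the proofs are below) =====
def Claim_equal_determine_message_type_py : Prop := ∀ (message : String), Dom_determine_message_type_py message → Spec_determine_message_type_py message (determine_message_type_py message)

-- ===== LEMMAS AND PROOFS =====

-- A's rules, grouped: group i holds exactly the pvEntries of priority i, in A's textual order
def pvGroups : List (List (String × Option String × Nat)) :=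
  [[("triggers the", none, 0), ("sets off the", none, 0), ("activates the", none, 0), ("fumbles with", none, 0), ("accidentally triggers", none, 0)],
  [("waters the", none, 1), ("plants the", none, 1), ("harvests the", none, 1), ("applies fertilizer", none, 1), ("garden", none, 1), ("planting", none, 1), ("watering", none, 1)],
  [("teleport", none, 2)],
  [("resists the", some "effect", 3)],
  [("sees ", none, 4), ("imagines ", none, 4), ("thinks ", none, 4), ("believes ", none, 4), ("hallucinates ", none, 4), ("visualizes ", none, 4), ("perceives ", none, 4), ("screams about ", none, 4), ("yells about ", none, 4), ("mutters about ", none, 4), ("swats at ", none, 4), ("runs from ", none, 4), ("hides from ", none, 4), ("stares at ", none, 4), ("points at ", none, 4), ("laughs at ", none, 4), ("confused by ", none, 4), ("startled by ", none, 4), ("terrified of ", none, 4), ("dancing with ", none, 4), ("talking to ", none, 4), ("arguing with ", none, 4), ("fighting with ", none, 4), ("fleeing from ", none, 4), ("cowering from ", none, 4)],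
  [("attack", none, 5), ("damage", none, 5), ("health", none, 5)],
  [("hallucinating", none, 6), ("hallucination", none, 6), ("seeing things", none, 6)],
  [("affected by hallucinations", none, 7)],
  [("friendly", none, 8), ("friendliness", none, 8), ("smiles at you", none, 8)],
  [("gives you", none, 9), ("gift", none, 9)],
  [("falls", none, 10), ("falling", none, 10), ("struck by", none, 10)],
  [("doesn't notice", none, 11), ("unaware", none, 11), ("looking away", none, 11), ("hasn't spotted", none, 11), ("looking the other way", none, 11), ("distracted", none, 11), ("fails to notice", none, 11), ("oblivious", none, 11), ("walks past your hiding spot", none, 11)],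
  [("talk", none, 12), ("says", none, 12), ("speaking", none, 12)],
  [("interact", none, 13), ("using", none, 13), ("picks up", none, 13)],
  [("standing", none, 14), ("idle", none, 14), ("waiting", none, 14)]]

def pvToPrio? (ml : String) (e : String × Option String × Nat) : Option Nat :=
  if pvEntryMatch ml e then some e.2.2 else none

theorem pvOptMin_rightComm : RightCommutative pvOptMin := by
  constructor
  intro a p q
  cases a <;> simp [pvOptMin, Nat.min_comm]
  omega

theorem pv_fold_eq_filterMap (ml : String) :
    ∀ (l : List (String × Option String × Nat)) (acc : Option Nat),
      l.foldl (fun acc e => if pvEntryMatch ml e then pvOptMin acc e.2.2 else acc) acc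
        = (l.filterMap (pvToPrio? ml)).foldl pvOptMin acc := by
  intro l
  induction l with
  | nil => intro acc; rfl
  | cons e l ih =>
    intro acc
    by_cases h : pvEntryMatch ml e = true <;> simp [pvToPrio?, h, ih]

theorem pv_fold_const (i : Nat) :
    ∀ (l : List Nat), (∀ x ∈ l, x = i) → ∀ (acc : Option Nat),
      l.foldl pvOptMin acc = if l.isEmpty then acc else pvOptMin acc i := by
  intro l
  induction l with
  | nil => intro _ acc; rfl
  | cons x l ih =>
    intro h acc
    have hx : x = i := h x (by simp)
    have hrest : ∀ y ∈ l, y = i := fun y hy => h y (by simp [hy])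
    subst hx
    simp only [List.foldl_cons, ih hrest, List.isEmpty_cons]
    cases hl : l.isEmpty <;> cases acc <;> simp [pvOptMin, Nat.min_assoc]

def pvFirstTrue : Nat → List Bool → Option Nat
  | _, [] => none
  | k, b :: bs => if b then some k else pvFirstTrue (k+1) bs

def pvChain : Nat → Option Nat → List Bool → Option Nat
  | _, acc, [] => acc
  | k, acc, b :: bs => pvChain (k+1) (if b then pvOptMin acc k else acc) bs

theorem pvChain_some : ∀ (bs : List Bool) (k q : Nat), q ≤ k →
    pvChain k (some q) bs = some q := by
  intro bs
  induction bs with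
  | nil => intro k q _; rfl
  | cons b bs ih =>
    intro k q hq
    have hmin : min q k = q := Nat.min_eq_left hq
    cases b <;> simp [pvChain, pvOptMin, hmin] <;> exact ih _ _ (by omega)

theorem pvChain_none : ∀ (bs : List Bool) (k : Nat),
    pvChain k none bs = pvFirstTrue k bs := by
  intro bs
  induction bs with
  | nil => intro k; rfl
  | cons b bs ih =>
    intro k
    cases b with
    | false => simp [pvChain, pvFirstTrue, ih]
    | true => simp [pvChain, pvFirstTrue, pvOptMin, pvChain_some bs (k+1) k (by omega)]

theorem pv_grouped_fold (ml : String) :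
    ∀ (gs : List (List (String × Option String × Nat))) (k : Nat) (acc : Option Nat),
      (∀ i, ∀ (hi : i < gs.length), ∀ e ∈ gs[i], e.2.2 = k + i) →
      (gs.flatten.filterMap (pvToPrio? ml)).foldl pvOptMin acc
        = pvChain k acc (gs.map (fun g => g.any (pvEntryMatch ml))) := by
  intro gs
  induction gs with
  | nil => intro k acc _; rfl
  | cons g gs ih =>
    intro k acc h
    have hg : ∀ e ∈ g, e.2.2 = k := by
      intro e he
      have := h 0 (by simp) e (by simpa using he)
      simpa using this
    have hconst : ∀ x ∈ g.filterMap (pvToPrio? ml), x = k := by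
      intro x hx
      rcases List.mem_filterMap.mp hx with ⟨e, he, hfe⟩
      unfold pvToPrio? at hfe
      by_cases hm : pvEntryMatch ml e = true
      · simp [hm] at hfe; rw [← hfe]; exact hg e he
      · simp [hm] at hfe
    have hempty : (g.filterMap (pvToPrio? ml)).isEmpty = !(g.any (pvEntryMatch ml)) := by
      cases hany : g.any (pvEntryMatch ml) with
      | true =>
        rcases List.any_eq_true.mp hany with ⟨e, he, hm⟩
        simp only [Bool.not_true, List.isEmpty_eq_false_iff, ne_eq, List.filterMap_eq_nil_iff]
        intro hall
        have := hall e he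
        simp [pvToPrio?, hm] at this
      | false =>
        simp only [Bool.not_false, List.isEmpty_iff, List.filterMap_eq_nil_iff]
        intro e he
        have hne : ¬ pvEntryMatch ml e = true := fun hm => (List.any_eq_false.mp hany) e he hm
        simp [pvToPrio?, hne]
    have hnext : ∀ i, ∀ (hi : i < gs.length), ∀ e ∈ gs[i], e.2.2 = (k+1) + i := by
      intro i hi e he
      have := h (i+1) (by simpa using Nat.succ_lt_succ hi) e (by simpa using he)
      omega
    simp only [List.flatten_cons, List.filterMap_append, List.foldl_append, List.map_cons, pvChain]
    rw [pv_fold_const k (g.filterMap (pvToPrio? ml)) hconst acc, hempty]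
    rw [ih (k+1) _ hnext]
    cases g.any (pvEntryMatch ml) <;> simp

set_option maxHeartbeats 4000000 in
theorem pv_perm : pvEntries.Perm pvGroups.flatten := by decide

theorem pvCascade (b0 b1 b2 b3 b4 b5 b6 b7 b8 b9 b10 b11 b12 b13 b14 : Bool) :
    (if b0 = true then some "hazard_trigger" else (if b1 = true then some "npc_gardening" else (if b2 = true then some "player_teleport" else (if b3 = true then some "npc_resist_hazard" else (if b4 = true then some "npc_hallucination_detail" else (if b5 = true then some "npc_attack" else (if b6 = true then some "npc_hallucination_detail" else (if b7 = true then some "npc_hallucination" else (if b8 = true then some "npc_friendly" else (if b9 = true then some "npc_gift" else (if b10 = true then some "npc_falling_object" else (if b11 = true then some "npc_idle" else (if b12 = true then some "npc_talk" else (if b13 = true then some "npc_interact" else (if b14 = true then some "npc_idle" else none)))))))))))))))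
      = (match pvFirstTrue 0 [b0, b1, b2, b3, b4, b5, b6, b7, b8, b9, b10, b11, b12, b13, b14] with
         | none => (none : Option String)
         | some p => PySem.List.pyGet? pvCategories (p : Int)) := by
  cases b0 with
  | true =>
    simp [pvFirstTrue]
    try decide
  | false =>
    simp only [pvFirstTrue, Bool.false_eq_true, if_false]
    cases b1 with
    | true =>
      simp [pvFirstTrue]
      try decide
    | false =>
      simp only [pvFirstTrue, Bool.false_eq_true, if_false]
      cases b2 with
      | true =>
        simp [pvFirstTrue]
        try decide
      | false =>
        simp only [pvFirstTrue, Bool.false_eq_true, if_false]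
        cases b3 with
        | true =>
          simp [pvFirstTrue]
          try decide
        | false =>
          simp only [pvFirstTrue, Bool.false_eq_true, if_false]
          cases b4 with
          | true =>
            simp [pvFirstTrue]
            try decide
          | false =>
            simp only [pvFirstTrue, Bool.false_eq_true, if_false]
            cases b5 with
            | true =>
              simp [pvFirstTrue]
              try decide
            | false =>
              simp only [pvFirstTrue, Bool.false_eq_true, if_false]
              cases b6 with
              | true =>
                simp [pvFirstTrue]
                try decide
              | false =>
                simp only [pvFirstTrue, Bool.false_eq_true, if_false]
                cases b7 with
                | true =>
                  simp [pvFirstTrue]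
                  try decide
                | false =>
                  simp only [pvFirstTrue, Bool.false_eq_true, if_false]
                  cases b8 with
                  | true =>
                    simp [pvFirstTrue]
                    try decide
                  | false =>
                    simp only [pvFirstTrue, Bool.false_eq_true, if_false]
                    cases b9 with
                    | true =>
                      simp [pvFirstTrue]
                      try decide
                    | false =>
                      simp only [pvFirstTrue, Bool.false_eq_true, if_false]
                      cases b10 with
                      | true =>
                        simp [pvFirstTrue]
                        try decide
                      | false =>
                        simp only [pvFirstTrue, Bool.false_eq_true, if_false]
                        cases b11 with
                        | true =>
                          simp [pvFirstTrue]
                          try decide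
                        | false =>
                          simp only [pvFirstTrue, Bool.false_eq_true, if_false]
                          cases b12 with
                          | true =>
                            simp [pvFirstTrue]
                            try decide
                          | false =>
                            simp only [pvFirstTrue, Bool.false_eq_true, if_false]
                            cases b13 with
                            | true =>
                              simp [pvFirstTrue]
                              try decide
                            | false =>
                              simp only [pvFirstTrue, Bool.false_eq_true, if_false]
                              cases b14 with
                              | true =>
                                simp [pvFirstTrue]
                                try decide
                              | false =>
                                simp only [pvFirstTrue, Bool.false_eq_true, if_false]

set_option maxHeartbeats 1000000 in
theorem pv_main (message : String) :
    determine_message_type_py message = determine_message_type_py_alt message := by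
  unfold determine_message_type_py determine_message_type_py_alt
  dsimp only
  rw [pv_fold_eq_filterMap (PySem.Str.lower message) pvEntries none]
  rw [@List.Perm.foldl_eq _ _ pvOptMin _ _ pvOptMin_rightComm
        (pv_perm.filterMap (pvToPrio? (PySem.Str.lower message))) none]
  rw [pv_grouped_fold (PySem.Str.lower message) pvGroups 0 none (by decide)]
  rw [pvChain_none]
  simp only [pvGroups, List.map_cons, List.map_nil, List.any_cons, List.any_nil,
    pvEntryMatch, Bool.or_false, Bool.and_true, Bool.or_assoc]
  exact pvCascade _ _ _ _ _ _ _ _ _ _ _ _ _ _ _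

-- ===== VERDICT (by name: the statement is the Claim_ definition above) =====
theorem determine_message_type_py_spec : Claim_equal_determine_message_type_py := by
  intro message _
  exact pv_main message
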